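-- pv_equiv track=rewrite | github.com/hermiaTT/CCC-courses-python-java | 2023/Junior/Solutions_python.py | eventDays
-- ===== SOURCE A (Python) =====
-- def eventDays(n,availability):
--     res = []
--     curMax = 0
--     for j in range(5):
--         curSum = 0
--         for i in range(n):
--             if availability[i][j] == 'Y':
--                 curSum +=1
--         if curSum >curMax:
--             res = [str(j+1)]
--             curMax = curSum
--         elif curSum ==curMax:
--             res.append(str(j+1))
--     return ','.join(res)
-- ===== SOURCE B (Python) =====
-- def eventDays(n, availability):
--     counts = [sum(1 for i in range(n) if availability[i][j] == 'Y') for j in range(5)]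
--     m = max(counts)
--     return ','.join(str(j + 1) for j in range(5) if counts[j] == m)
-- ===== Notes on version B (the rewrite author's own statement) =====
-- stated objective: simpler
-- what changed: Replaces A's single-pass running-max-with-reset accumulator over columns by a compute-all-counts list, take max, then filter-join decomposition.
import Mathlib
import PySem

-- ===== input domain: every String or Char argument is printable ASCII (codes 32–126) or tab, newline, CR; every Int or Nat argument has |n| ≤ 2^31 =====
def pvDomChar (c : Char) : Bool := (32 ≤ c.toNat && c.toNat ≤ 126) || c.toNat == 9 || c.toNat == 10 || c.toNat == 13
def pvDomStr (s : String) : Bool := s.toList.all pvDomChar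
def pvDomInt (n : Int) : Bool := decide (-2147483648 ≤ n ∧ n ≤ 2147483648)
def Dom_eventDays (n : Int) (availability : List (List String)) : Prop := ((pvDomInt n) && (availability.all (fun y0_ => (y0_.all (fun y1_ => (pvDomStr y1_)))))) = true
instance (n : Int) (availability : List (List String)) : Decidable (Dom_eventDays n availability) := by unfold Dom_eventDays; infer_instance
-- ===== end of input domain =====

-- B replaces A's running-max-with-reset accumulation by compute-all-counts, max, then filter-join (objective: simpler).

-- ===== PORT A =====
-- literal transliteration of A: state (res, curMax), for j in range(5) an inner
-- count loop over range(n), then the >/==/else branch chain; indexing via pyGetD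
-- (exact under Pre_, which puts every index in range).
def eventDays (n : Int) (availability : List (List String)) : String :=
  let st := (PySem.List.pyRange 0 5 1).foldl
    (fun (st : List String × Int) j =>
      let curSum := (PySem.List.pyRange 0 n 1).foldl
        (fun curSum i =>
          if PySem.List.pyGetD (PySem.List.pyGetD availability i []) j "" = "Y"
          then curSum + 1 else curSum) 0
      if curSum > st.2 then ([PySem.Int.toStr (j + 1)], curSum)
      else if curSum = st.2 then (st.1 ++ [PySem.Int.toStr (j + 1)], st.2)
      else st)
    ([], 0)
  PySem.Str.join "," st.1

-- ===== PORT B =====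
-- counts[j] = sum(1 for i in range(n) if availability[i][j] == 'Y')
def pvCount (n : Int) (availability : List (List String)) (j : Int) : Int :=
  (PySem.List.pyRange 0 n 1).foldl
    (fun s i =>
      if PySem.List.pyGetD (PySem.List.pyGetD availability i []) j "" = "Y"
      then s + 1 else s) 0

def eventDays_alt (n : Int) (availability : List (List String)) : String :=
  let counts := (PySem.List.pyRange 0 5 1).map (fun j => pvCount n availability j)
  let m := (PySem.List.max? counts (fun y => y)).getD 0
  PySem.Str.join ","
    (((PySem.List.pyRange 0 5 1).filter
        (fun j => PySem.List.pyGetD counts j 0 = m)).map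
      (fun j => PySem.Int.toStr (j + 1)))

-- ===== PRECONDITION & SPEC =====
-- Pre_ excludes exactly the inputs on which the Python A raises an IndexError:
-- it needs rows 0..n-1 to exist and each of those rows to have at least 5 entries.
def Pre_eventDays (n : Int) (availability : List (List String)) : Prop :=
  n ≤ availability.length ∧ ∀ r ∈ availability.take n.toNat, 5 ≤ r.length
instance (n : Int) (availability : List (List String)) : Decidable (Pre_eventDays n availability) := by unfold Pre_eventDays; infer_instance
def pvWitness_eventDays : Int × List (List String) :=
  (2, [["Y","N","Y","N","N"], ["Y","N","N","N","N"]])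

def Spec_eventDays (n : Int) (availability : List (List String)) (out : String) : Prop := out = eventDays_alt n availability
instance (n : Int) (availability : List (List String)) (out : String) : Decidable (Spec_eventDays n availability out) := by unfold Spec_eventDays; infer_instance

-- ===== CLAIM (what is proved, stated in full; the proofs are below) =====
def Claim_equal_eventDays : Prop := ∀ (n : Int) (availability : List (List String)), Dom_eventDays n availability → Pre_eventDays n availability → Spec_eventDays n availability (eventDays n availability)

-- ===== LEMMAS AND PROOFS =====

-- A's loop body, over (column index, column count) pairs
def pvStepA (st : List String × Int) (p : Int × Int) : List String × Int :=
  if p.2 > st.2 then ([PySem.Int.toStr (p.1 + 1)], p.2)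
  else if p.2 = st.2 then (st.1 ++ [PySem.Int.toStr (p.1 + 1)], st.2)
  else st

theorem pv_le_foldl_max (l : List (Int × Int)) (m : Int) :
    m ≤ l.foldl (fun a p => max a p.2) m := by
  induction l generalizing m with
  | nil => simp
  | cons p l ih => exact le_trans (le_max_left _ _) (ih (max m p.2))

-- characterisation of A's loop: the surviving labels are exactly the columns
-- whose count equals the overall running max
theorem pv_foldl_stepA_char (l : List (Int × Int)) (res : List String) (m : Int) :
    l.foldl pvStepA (res, m) =
      ((if l.foldl (fun a p => max a p.2) m = m then res else []) ++
        (l.filter (fun p => p.2 = l.foldl (fun a p => max a p.2) m)).map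
          (fun p => PySem.Int.toStr (p.1 + 1)),
       l.foldl (fun a p => max a p.2) m) := by
  induction l generalizing res m with
  | nil => simp
  | cons p l ih =>
    rcases lt_trichotomy m p.2 with h | h | h
    · -- p.2 > m : reset
      have hmax : max m p.2 = p.2 := max_eq_right h.le
      have hle : p.2 ≤ l.foldl (fun a p => max a p.2) p.2 := by
        have := pv_le_foldl_max l (max m p.2); rwa [hmax] at this
      simp only [List.foldl_cons, pvStepA, hmax]
      rw [if_pos h, ih]
      have hMm : ¬ (l.foldl (fun a p => max a p.2) p.2 = m) := by omega
      rw [if_neg hMm, List.filter_cons]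
      simp only [decide_eq_true_eq]
      by_cases ht : p.2 = l.foldl (fun a p => max a p.2) p.2
      · rw [if_pos ht.symm, if_pos ht]; simp
      · rw [if_neg (fun he => ht he.symm), if_neg ht]
    · -- p.2 = m : tie, append
      have hmax : max m p.2 = m := by omega
      simp only [List.foldl_cons, pvStepA, hmax]
      rw [if_neg (by omega), if_pos h.symm, ih, List.filter_cons]
      by_cases hM : l.foldl (fun a p => max a p.2) m = m
      · simp [hM, ← h]
      · rw [if_neg hM]
        simp only [decide_eq_true_eq]
        rw [if_neg (show ¬ p.2 = l.foldl (fun a p => max a p.2) m from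
          fun he => hM (he.symm.trans h.symm))]
        rw [if_neg hM]
    · -- p.2 < m : skip
      have hmax : max m p.2 = m := max_eq_left h.le
      have hle : m ≤ l.foldl (fun a p => max a p.2) m := by
        have := pv_le_foldl_max l (max m p.2); rwa [hmax] at this
      have hne : ¬ (p.2 = l.foldl (fun a p => max a p.2) m) := by omega
      simp only [List.foldl_cons, pvStepA, hmax]
      rw [if_neg (by omega), if_neg (by omega), ih, List.filter_cons]
      simp [hne]

theorem pvCount_nonneg (n : Int) (availability : List (List String)) (j : Int) :
    0 ≤ pvCount n availability j := by
  unfold pvCount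
  have : ∀ (l : List Int) (s : Int), s ≤ l.foldl
      (fun s i => if PySem.List.pyGetD (PySem.List.pyGetD availability i []) j "" = "Y"
        then s + 1 else s) s := by
    intro l
    induction l with
    | nil => simp
    | cons i l ih =>
      intro s
      refine le_trans ?_ (ih _)
      show s ≤ if PySem.List.pyGetD (PySem.List.pyGetD availability i []) j "" = "Y" then s + 1 else s
      split <;> omega
  exact this _ 0

-- ===== VERDICT (by name: the statement is the Claim_ definition above) =====
theorem eventDays_spec : Claim_equal_eventDays := by
  intro n availability _ _
  unfold Spec_eventDays eventDays eventDays_alt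
  have hrange : PySem.List.pyRange 0 5 1 = [0, 1, 2, 3, 4] := by decide
  set c : Int → Int := pvCount n availability with hc
  have hA : ([((0:Int), c 0), (1, c 1), (2, c 2), (3, c 3), (4, c 4)].foldl pvStepA ([], 0)) =
      ((PySem.List.pyRange 0 5 1).foldl
        (fun (st : List String × Int) j =>
          let curSum := (PySem.List.pyRange 0 n 1).foldl
            (fun curSum i =>
              if PySem.List.pyGetD (PySem.List.pyGetD availability i []) j "" = "Y"
              then curSum + 1 else curSum) 0
          if curSum > st.2 then ([PySem.Int.toStr (j + 1)], curSum)
          else if curSum = st.2 then (st.1 ++ [PySem.Int.toStr (j + 1)], st.2)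
          else st)
        ([], 0)) := by
    rw [hrange]; rfl
  rw [← hA, pv_foldl_stepA_char]
  -- the overall max, once, starting from 0 and starting from c 0, coincide
  have h0 : max 0 (c 0) = c 0 := max_eq_right (pvCount_nonneg n availability 0)
  have hM : ([((0:Int), c 0), (1, c 1), (2, c 2), (3, c 3), (4, c 4)].foldl
      (fun a p => max a p.2) 0) = [c 1, c 2, c 3, c 4].foldl max (c 0) := by
    simp [h0]
  rw [hrange]
  simp only [List.map_cons, List.map_nil, PySem.List.max?_id_cons, Option.getD_some, hM]
  set M := [c 1, c 2, c 3, c 4].foldl max (c 0) with hMdef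
  simp only [List.filter]
  by_cases h0 : c 0 = M <;> by_cases h1 : c 1 = M <;> by_cases h2 : c 2 = M <;>
    by_cases h3 : c 3 = M <;> by_cases h4 : c 4 = M <;>
    simp [PySem.List.pyGetD_ofNat', h0, h1, h2, h3, h4]
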